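-- pv_equiv track=rewrite | github.com/slinkers99/mailamator | app/dns.py | build_zone_file
-- ===== SOURCE A (Python) =====
-- def DNS_RECORDS(domain: str, ownership_code: str) -> list[dict]:
--     return [
--         {"type": "MX", "name": f"{domain}.", "value": "mailserver.purelymail.com.", "priority": 50},
--         {"type": "TXT", "name": f"{domain}.", "value": f"v=spf1 include:_spf.purelymail.com ~all"},
--         {"type": "TXT", "name": f"{domain}.", "value": ownership_code},
--         {"type": "CNAME", "name": f"purelymail1._domainkey.{domain}.", "value": "key1.dkimroot.purelymail.com."},
--         {"type": "CNAME", "name": f"purelymail2._domainkey.{domain}.", "value": "key2.dkimroot.purelymail.com."},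
--         {"type": "CNAME", "name": f"purelymail3._domainkey.{domain}.", "value": "key3.dkimroot.purelymail.com."},
--         {"type": "CNAME", "name": f"_dmarc.{domain}.", "value": "dmarcroot.purelymail.com."},
--     ]
--
-- def build_zone_file(domain: str, ownership_code: str) -> str:
--     records = DNS_RECORDS(domain, ownership_code)
--     lines = [f"; Purelymail DNS records for {domain}", f"; Import this file into Cloudflare via DNS > Records > Import", ""]
--     for r in records:
--         if r["type"] == "MX":
--             lines.append(f'{r["name"]}\tIN\tMX\t{r["priority"]}\t{r["value"]}')
--         elif r["type"] == "TXT":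
--             lines.append(f'{r["name"]}\tIN\tTXT\t"{r["value"]}"')
--         elif r["type"] == "CNAME":
--             lines.append(f'{r["name"]}\tIN\tCNAME\t{r["value"]}')
--     lines.append("")
--     return "\n".join(lines)
-- ===== SOURCE B (Python) =====
-- def build_zone_file(domain: str, ownership_code: str) -> str:
--     # Build the seven record lines directly from the two inputs; no intermediate
--     # list-of-dicts and no per-record type dispatch.
--     return "\n".join([
--         f"; Purelymail DNS records for {domain}",
--         "; Import this file into Cloudflare via DNS > Records > Import",
--         "",
--         f"{domain}.\tIN\tMX\t50\tmailserver.purelymail.com.",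
--         f'{domain}.\tIN\tTXT\t"v=spf1 include:_spf.purelymail.com ~all"',
--         f'{domain}.\tIN\tTXT\t"{ownership_code}"',
--         f"purelymail1._domainkey.{domain}.\tIN\tCNAME\tkey1.dkimroot.purelymail.com.",
--         f"purelymail2._domainkey.{domain}.\tIN\tCNAME\tkey2.dkimroot.purelymail.com.",
--         f"purelymail3._domainkey.{domain}.\tIN\tCNAME\tkey3.dkimroot.purelymail.com.",
--         f"_dmarc.{domain}.\tIN\tCNAME\tdmarcroot.purelymail.com.",
--         "",
--     ])
-- ===== Notes on version B (the rewrite author's own statement) =====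
-- stated objective: simpler
-- what changed: B drops the DNS_RECORDS list-of-dicts and the per-record type-dispatch loop, building the zone file directly as a join of fully-formatted literal line strings from the two inputs.
import Mathlib
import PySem

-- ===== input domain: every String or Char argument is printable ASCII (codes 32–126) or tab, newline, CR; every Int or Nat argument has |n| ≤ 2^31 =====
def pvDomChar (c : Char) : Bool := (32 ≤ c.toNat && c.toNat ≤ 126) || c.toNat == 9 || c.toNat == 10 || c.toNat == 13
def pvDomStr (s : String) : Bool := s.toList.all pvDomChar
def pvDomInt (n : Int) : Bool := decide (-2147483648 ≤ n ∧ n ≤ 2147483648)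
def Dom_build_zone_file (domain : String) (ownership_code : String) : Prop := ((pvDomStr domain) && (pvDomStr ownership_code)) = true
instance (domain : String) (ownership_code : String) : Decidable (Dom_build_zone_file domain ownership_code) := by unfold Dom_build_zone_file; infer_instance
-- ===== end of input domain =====

-- B drops the record table and dispatch loop and joins literal formatted lines directly (objective: simpler).

-- ===== PORT A =====
-- a DNS record dict {"type","name","value"[, "priority"]} as a structure
structure PvRec where
  rtype : String
  name : String
  value : String
  priority : Option Int
deriving DecidableEq, Repr

def DNS_RECORDS (domain : String) (ownership_code : String) : List PvRec :=
  [ ⟨"MX", domain ++ ".", "mailserver.purelymail.com.", some 50⟩,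
    ⟨"TXT", domain ++ ".", "v=spf1 include:_spf.purelymail.com ~all", none⟩,
    ⟨"TXT", domain ++ ".", ownership_code, none⟩,
    ⟨"CNAME", "purelymail1._domainkey." ++ domain ++ ".", "key1.dkimroot.purelymail.com.", none⟩,
    ⟨"CNAME", "purelymail2._domainkey." ++ domain ++ ".", "key2.dkimroot.purelymail.com.", none⟩,
    ⟨"CNAME", "purelymail3._domainkey." ++ domain ++ ".", "key3.dkimroot.purelymail.com.", none⟩,
    ⟨"CNAME", "_dmarc." ++ domain ++ ".", "dmarcroot.purelymail.com.", none⟩ ]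

def build_zone_file (domain : String) (ownership_code : String) : String :=
  let records := DNS_RECORDS domain ownership_code
  let lines : List String :=
    ["; Purelymail DNS records for " ++ domain,
     "; Import this file into Cloudflare via DNS > Records > Import", ""]
  let lines := records.foldl (fun ls r =>
    if r.rtype == "MX" then
      ls ++ [r.name ++ "\tIN\tMX\t" ++ PySem.Int.toStr (r.priority.getD 0) ++ "\t" ++ r.value]
    else if r.rtype == "TXT" then
      ls ++ [r.name ++ "\tIN\tTXT\t\"" ++ r.value ++ "\""]
    else if r.rtype == "CNAME" then
      ls ++ [r.name ++ "\tIN\tCNAME\t" ++ r.value]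
    else ls) lines
  let lines := lines ++ [""]
  String.intercalate "\n" lines

-- ===== PORT B =====
def build_zone_file_alt (domain : String) (ownership_code : String) : String :=
  String.intercalate "\n"
    [ "; Purelymail DNS records for " ++ domain,
      "; Import this file into Cloudflare via DNS > Records > Import",
      "",
      domain ++ ".\tIN\tMX\t50\tmailserver.purelymail.com.",
      domain ++ ".\tIN\tTXT\t\"v=spf1 include:_spf.purelymail.com ~all\"",
      domain ++ ".\tIN\tTXT\t\"" ++ ownership_code ++ "\"",
      "purelymail1._domainkey." ++ domain ++ ".\tIN\tCNAME\tkey1.dkimroot.purelymail.com.",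
      "purelymail2._domainkey." ++ domain ++ ".\tIN\tCNAME\tkey2.dkimroot.purelymail.com.",
      "purelymail3._domainkey." ++ domain ++ ".\tIN\tCNAME\tkey3.dkimroot.purelymail.com.",
      "_dmarc." ++ domain ++ ".\tIN\tCNAME\tdmarcroot.purelymail.com.",
      "" ]

-- ===== PRECONDITION & SPEC =====
def Spec_build_zone_file (domain : String) (ownership_code : String) (out : String) : Prop := out = build_zone_file_alt domain ownership_code
instance (domain : String) (ownership_code : String) (out : String) : Decidable (Spec_build_zone_file domain ownership_code out) := by unfold Spec_build_zone_file; infer_instance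

-- ===== CLAIM (what is proved, stated in full; the proofs are below) =====
def Claim_equal_build_zone_file : Prop := ∀ (domain : String) (ownership_code : String), Dom_build_zone_file domain ownership_code → Spec_build_zone_file domain ownership_code (build_zone_file domain ownership_code)

-- ===== LEMMAS AND PROOFS =====

-- ===== VERDICT (by name: the statement is the Claim_ definition above) =====
theorem build_zone_file_spec : Claim_equal_build_zone_file := by
  intro domain ownership_code _
  show build_zone_file domain ownership_code = build_zone_file_alt domain ownership_code
  simp [build_zone_file, build_zone_file_alt, DNS_RECORDS, List.foldl, PySem.Int.toStr]
  have h50 : String.ofList (PySem.Int.toChars 50) = "50" := by decide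
  rw [h50]
  simp [String.append_assoc]
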